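-- pv_equiv track=rewrite | github.com/Boltzee/First_one | genome assembly last 2.py | optimum
-- ===== SOURCE A (Python) =====
-- def optimum(n, r):
-- 	clone = set()
-- 	for re_ad in r:
-- 		for i in range(0, len(re_ad)-n+1):
-- 			clone.add(re_ad[i:i+n])
-- 	pref = set()
-- 	suff = set()
-- 	for kmer in clone:
-- 		pref.add(kmer[:-1])
-- 		suff.add(kmer[1:])
-- 	return pref == suff
-- ===== SOURCE B (Python) =====
-- def optimum(n, r):
--     mark = {}
--     done = set()
--     for read in r:
--         for i in range(0, len(read) - n + 1):
--             kmer = read[i:i+n]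
--             if kmer in done:
--                 continue
--             done.add(kmer)
--             pre, suf = kmer[:-1], kmer[1:]
--             p, s = mark.get(pre, (False, False))
--             mark[pre] = (True, s)
--             p, s = mark.get(suf, (False, False))
--             mark[suf] = (p, True)
--     return all(p and s for p, s in mark.values())
-- ===== Notes on version B (the rewrite author's own statement) =====
-- stated objective: alternative
-- what changed: Replaces the two prefix/suffix sets and the set-equality comparison by a single dict from each (n-1)-mer to a (seen-as-prefix, seen-as-suffix) flag pair, filled in one pass over all windows with duplicate kmers skipped via a seen-set, returning whether every recorded mer carries both flags.
import Mathlib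
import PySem

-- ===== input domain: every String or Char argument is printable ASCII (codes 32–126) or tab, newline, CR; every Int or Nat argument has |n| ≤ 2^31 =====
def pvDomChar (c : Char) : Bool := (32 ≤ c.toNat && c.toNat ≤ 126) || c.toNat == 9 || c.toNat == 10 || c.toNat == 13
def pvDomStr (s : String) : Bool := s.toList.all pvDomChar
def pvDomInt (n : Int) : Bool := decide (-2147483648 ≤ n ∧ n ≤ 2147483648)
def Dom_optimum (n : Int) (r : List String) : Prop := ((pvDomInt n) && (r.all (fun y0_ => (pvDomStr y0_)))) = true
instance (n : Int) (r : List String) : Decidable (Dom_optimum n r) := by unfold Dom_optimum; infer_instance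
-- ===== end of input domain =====

-- B replaces A's two sets and set-equality test by one dict mapping each (n-1)-mer to a
-- (seen-as-prefix, seen-as-suffix) flag pair, filled in a single pass over all windows
-- (duplicate kmers skipped via a seen-set); the answer is whether every recorded mer
-- carries both flags (objective: alternative).

-- ===== PORT A =====
def optimum (n : Int) (r : List String) : Bool :=
  let clone : PySem.Set String := r.foldl (fun clone re_ad =>
    (PySem.List.pyRange 0 ((PySem.Str.len re_ad) - n + 1) 1).foldl
      (fun clone i => PySem.Set.add clone (PySem.Str.slice re_ad (some i) (some (i + n)))) clone)
    PySem.Set.empty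
  let ps : PySem.Set String × PySem.Set String := clone.foldl
    (fun ps kmer =>
      (PySem.Set.add ps.1 (PySem.Str.slice kmer none (some (-1))),
       PySem.Set.add ps.2 (PySem.Str.slice kmer (some 1) none)))
    (PySem.Set.empty, PySem.Set.empty)
  PySem.Set.equal ps.1 ps.2

-- ===== PORT B =====
-- kmer[:-1] and kmer[1:]
def pvPre (k : String) : String := PySem.Str.slice k none (some (-1))
def pvSuf (k : String) : String := PySem.Str.slice k (some 1) none

-- record one window's prefix and suffix flags in the dict (body after the `continue` guard)
def pvMark (mark : PySem.Dict String (Bool × Bool)) (kmer : String) : PySem.Dict String (Bool × Bool) :=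
  let pre := pvPre kmer
  let suf := pvSuf kmer
  let m1 := mark.insert pre (true, (mark.getD pre (false, false)).2)
  m1.insert suf ((m1.getD suf (false, false)).1, true)

-- one inner-loop iteration: skip kmers already done, else remember the kmer and mark its flags
def pvStep (st : PySem.Set String × PySem.Dict String (Bool × Bool)) (kmer : String) :
    PySem.Set String × PySem.Dict String (Bool × Bool) :=
  if PySem.Set.contains st.1 kmer then st
  else (PySem.Set.add st.1 kmer, pvMark st.2 kmer)

def optimum_alt (n : Int) (r : List String) : Bool :=
  let st : PySem.Set String × PySem.Dict String (Bool × Bool) := r.foldl (fun st read =>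
    (PySem.List.pyRange 0 ((PySem.Str.len read) - n + 1) 1).foldl
      (fun st i => pvStep st (PySem.Str.slice read (some i) (some (i + n)))) st)
    (PySem.Set.empty, PySem.Dict.empty)
  st.2.values.all (fun ps => ps.1 && ps.2)

-- ===== PRECONDITION & SPEC =====
def Spec_optimum (n : Int) (r : List String) (out : Bool) : Prop := out = optimum_alt n r
instance (n : Int) (r : List String) (out : Bool) : Decidable (Spec_optimum n r out) := by unfold Spec_optimum; infer_instance

-- ===== CLAIM (what is proved, stated in full; the proofs are below) =====
def Claim_equal_optimum : Prop := ∀ (n : Int) (r : List String), Dom_optimum n r → Spec_optimum n r (optimum n r)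

-- ===== LEMMAS AND PROOFS =====

-- A's single pair-building loop splits into two independent Set.add folds
theorem pv_split_pair {α β : Type} [BEq α] (l : List β) (f g : β → α) :
    ∀ (p s : PySem.Set α),
      l.foldl (fun ps k => (PySem.Set.add ps.1 (f k), PySem.Set.add ps.2 (g k))) (p, s)
        = (l.foldl (fun p k => PySem.Set.add p (f k)) p,
           l.foldl (fun s k => PySem.Set.add s (g k)) s) := by
  induction l with
  | nil => intro p s; rfl
  | cons k t ih => intro p s; simpa using ih _ _

-- membership in the nested (reads × windows) foldl of Set.add of images
theorem pv_mem_nested {α : Type} [BEq α] [LawfulBEq α] (r : List String)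
    (w : String → List Int) (f : String → Int → α) :
    ∀ (s : PySem.Set α) (x : α),
      x ∈ r.foldl (fun s re => (w re).foldl (fun s i => PySem.Set.add s (f re i)) s) s
        ↔ x ∈ s ∨ ∃ re ∈ r, ∃ i ∈ w re, x = f re i := by
  induction r with
  | nil => simp
  | cons re t ih =>
    intro s x
    simp only [List.foldl_cons, ih, PySem.Set.mem_foldl_add, List.mem_cons]
    constructor
    · rintro (⟨h | ⟨i, hi, rfl⟩⟩ | ⟨re', hre', i, hi, rfl⟩)
      · exact Or.inl h
      · exact Or.inr ⟨re, Or.inl rfl, i, hi, rfl⟩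
      · exact Or.inr ⟨re', Or.inr hre', i, hi, rfl⟩
    · rintro (h | ⟨re', (rfl | hre'), i, hi, rfl⟩)
      · exact Or.inl (Or.inl h)
      · exact Or.inl (Or.inr ⟨i, hi, rfl⟩)
      · exact Or.inr ⟨re', hre', i, hi, rfl⟩

-- characterisation of A's prefix/suffix sets: image of the deduplicated k-mer set = image of all windows
theorem pv_memA (n : Int) (r : List String) (h : String → String) (x : String) :
    x ∈ ((r.foldl (fun s re => (PySem.List.pyRange 0 ((PySem.Str.len re) - n + 1) 1).foldl
            (fun s i => PySem.Set.add s (PySem.Str.slice re (some i) (some (i + n)))) s)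
            PySem.Set.empty).foldl (fun s k => PySem.Set.add s (h k)) PySem.Set.empty)
      ↔ ∃ re ∈ r, ∃ i ∈ PySem.List.pyRange 0 ((PySem.Str.len re) - n + 1) 1,
            x = h (PySem.Str.slice re (some i) (some (i + n))) := by
  rw [PySem.Set.mem_foldl_add]
  simp only [PySem.Set.empty, List.not_mem_nil, false_or]
  constructor
  · rintro ⟨k, hk, rfl⟩
    rw [pv_mem_nested] at hk
    rcases hk with h' | ⟨re, hre, i, hi, rfl⟩
    · simp at h'
    · exact ⟨re, hre, i, hi, rfl⟩
  · rintro ⟨re, hre, i, hi, rfl⟩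
    refine ⟨_, ?_, rfl⟩
    rw [pv_mem_nested]
    exact Or.inr ⟨re, hre, i, hi, rfl⟩

-- one pvMark step: the flag pair at x gains exactly the bits for this window's pre/suf
theorem pv_getD_mark (d : PySem.Dict String (Bool × Bool)) (k : String) (x : String) :
    (pvMark d k).getD x (false, false)
      = ((d.getD x (false, false)).1 || decide (x = pvPre k),
         (d.getD x (false, false)).2 || decide (x = pvSuf k)) := by
  unfold pvMark
  simp only [PySem.Dict.getD_insert]
  by_cases hs : x = pvSuf k <;> by_cases hp : x = pvPre k <;> simp [hs, hp] <;> simp_all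

-- one pvMark step: key membership
theorem pv_keys_mark (d : PySem.Dict String (Bool × Bool)) (k : String) (x : String) :
    x ∈ (pvMark d k).keys ↔ x ∈ d.keys ∨ x = pvPre k ∨ x = pvSuf k := by
  unfold pvMark
  simp only [PySem.Dict.mem_keys_insert]
  tauto

theorem pv_nodup_mark (d : PySem.Dict String (Bool × Bool)) (k : String)
    (h : d.keys.Nodup) : (pvMark d k).keys.Nodup := by
  unfold pvMark
  exact PySem.Dict.nodup_keys_insert _ _ _ (PySem.Dict.nodup_keys_insert _ _ _ h)

-- "kmer k has been fully recorded in d"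
def pvDone (d : PySem.Dict String (Bool × Bool)) (k : String) : Prop :=
  (d.getD (pvPre k) (false, false)).1 = true ∧ (d.getD (pvSuf k) (false, false)).2 = true ∧
    pvPre k ∈ d.keys ∧ pvSuf k ∈ d.keys

theorem pv_done_mark_self (d : PySem.Dict String (Bool × Bool)) (k : String) :
    pvDone (pvMark d k) k := by
  refine ⟨?_, ?_, ?_, ?_⟩
  · rw [pv_getD_mark]; simp
  · rw [pv_getD_mark]; simp
  · rw [pv_keys_mark]; tauto
  · rw [pv_keys_mark]; tauto

theorem pv_done_mark_mono (d : PySem.Dict String (Bool × Bool)) (k k' : String)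
    (h : pvDone d k') : pvDone (pvMark d k) k' := by
  obtain ⟨h1, h2, h3, h4⟩ := h
  refine ⟨?_, ?_, ?_, ?_⟩
  · rw [pv_getD_mark]; simp [h1]
  · rw [pv_getD_mark]; simp [h2]
  · rw [pv_keys_mark]; exact Or.inl h3
  · rw [pv_keys_mark]; exact Or.inl h4

-- the guarded run over a list of kmers: flags, keys, nodup, and the seen-set invariant at once
theorem pv_run (L : List String) :
    ∀ (seen : PySem.Set String) (d : PySem.Dict String (Bool × Bool)),
      (∀ k ∈ seen, pvDone d k) →
      (∀ x, ((L.foldl pvStep (seen, d)).2).getD x (false, false)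
          = ((d.getD x (false, false)).1 || decide (∃ k ∈ L, x = pvPre k),
             (d.getD x (false, false)).2 || decide (∃ k ∈ L, x = pvSuf k))) ∧
      (∀ x, x ∈ ((L.foldl pvStep (seen, d)).2).keys
          ↔ x ∈ d.keys ∨ ∃ k ∈ L, x = pvPre k ∨ x = pvSuf k) ∧
      (d.keys.Nodup → ((L.foldl pvStep (seen, d)).2).keys.Nodup) ∧
      (∀ k ∈ (L.foldl pvStep (seen, d)).1, pvDone ((L.foldl pvStep (seen, d)).2) k) := by
  induction L with
  | nil =>
    intro seen d H
    refine ⟨fun x => by simp, fun x => by simp, fun h => h, H⟩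
  | cons k0 t ih =>
    intro seen d H
    simp only [List.foldl_cons]
    by_cases hc : PySem.Set.contains seen k0 = true
    · have hd : pvDone d k0 := H k0 (by rwa [PySem.Set.contains_iff] at hc)
      have hstep : pvStep (seen, d) k0 = (seen, d) := by unfold pvStep; rw [if_pos hc]
      rw [hstep]
      obtain ⟨ih1, ih2, ih3, ih4⟩ := ih seen d H
      refine ⟨?_, ?_, ih3, ih4⟩
      · intro x
        rw [ih1 x]
        simp only [Prod.mk.injEq]
        constructor <;>
          (rw [Bool.eq_iff_iff]
           simp only [Bool.or_eq_true, decide_eq_true_eq, List.mem_cons]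
           constructor
           · rintro (h | ⟨k, hk, rfl⟩)
             · exact Or.inl h
             · exact Or.inr ⟨k, Or.inr hk, rfl⟩
           · rintro (h | ⟨k, (rfl | hk), rfl⟩)
             · exact Or.inl h
             · first
               | exact Or.inl hd.1
               | exact Or.inl hd.2.1
             · exact Or.inr ⟨k, hk, rfl⟩)
      · intro x
        rw [ih2 x]
        simp only [List.mem_cons]
        constructor
        · rintro (h | ⟨k, hk, h⟩)
          · exact Or.inl h
          · exact Or.inr ⟨k, Or.inr hk, h⟩
        · rintro (h | ⟨k, (rfl | hk), h⟩)
          · exact Or.inl h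
          · rcases h with rfl | rfl
            · exact Or.inl hd.2.2.1
            · exact Or.inl hd.2.2.2
          · exact Or.inr ⟨k, hk, h⟩
    · have hstep : pvStep (seen, d) k0 = (PySem.Set.add seen k0, pvMark d k0) := by
        unfold pvStep; rw [if_neg hc]
      rw [hstep]
      have H' : ∀ k ∈ PySem.Set.add seen k0, pvDone (pvMark d k0) k := by
        intro k hk
        rw [PySem.Set.mem_add] at hk
        rcases hk with h | rfl
        · exact pv_done_mark_mono _ _ _ (H k h)
        · exact pv_done_mark_self _ _
      obtain ⟨ih1, ih2, ih3, ih4⟩ := ih (PySem.Set.add seen k0) (pvMark d k0) H'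
      refine ⟨?_, ?_, fun h => ih3 (pv_nodup_mark _ _ h), ih4⟩
      · intro x
        rw [ih1 x, pv_getD_mark]
        simp only [Prod.mk.injEq, Bool.or_assoc]
        constructor <;>
          (rw [Bool.eq_iff_iff]
           simp only [Bool.or_eq_true, decide_eq_true_eq, List.mem_cons]
           constructor
           · rintro (h | rfl | ⟨k, hk, rfl⟩)
             · exact Or.inl h
             · exact Or.inr ⟨k0, Or.inl rfl, rfl⟩
             · exact Or.inr ⟨k, Or.inr hk, rfl⟩
           · rintro (h | ⟨k, (rfl | hk), rfl⟩)
             · exact Or.inl h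
             · exact Or.inr (Or.inl rfl)
             · exact Or.inr (Or.inr ⟨k, hk, rfl⟩))
      · intro x
        rw [ih2 x, pv_keys_mark]
        simp only [List.mem_cons]
        constructor
        · rintro ((h | h) | ⟨k, hk, h⟩)
          · exact Or.inl h
          · exact Or.inr ⟨k0, Or.inl rfl, h⟩
          · exact Or.inr ⟨k, Or.inr hk, h⟩
        · rintro (h | ⟨k, (rfl | hk), h⟩)
          · exact Or.inl (Or.inl h)
          · exact Or.inl (Or.inr h)
          · exact Or.inr ⟨k, hk, h⟩

-- the nested loop over reads and window starts is the guarded run over the flattened kmer list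
theorem pv_flatten (n : Int) (r : List String)
    (st : PySem.Set String × PySem.Dict String (Bool × Bool)) :
    r.foldl (fun st read =>
        (PySem.List.pyRange 0 ((PySem.Str.len read) - n + 1) 1).foldl
          (fun st i => pvStep st (PySem.Str.slice read (some i) (some (i + n)))) st) st
      = (r.flatMap (fun re => (PySem.List.pyRange 0 ((PySem.Str.len re) - n + 1) 1).map
          (fun i => PySem.Str.slice re (some i) (some (i + n))))).foldl pvStep st := by
  induction r generalizing st with
  | nil => rfl
  | cons re t ih =>
    simp only [List.foldl_cons, List.flatMap_cons, List.foldl_append, List.foldl_map]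
    exact ih _

-- characterisation of B's result: every mer flagged at all is flagged as both prefix and suffix
theorem pv_altB (n : Int) (r : List String) :
    optimum_alt n r = true ↔ ∀ x : String,
      (∃ re ∈ r, ∃ i ∈ PySem.List.pyRange 0 ((PySem.Str.len re) - n + 1) 1,
          x = pvPre (PySem.Str.slice re (some i) (some (i + n)))
            ∨ x = pvSuf (PySem.Str.slice re (some i) (some (i + n)))) →
      ((∃ re ∈ r, ∃ i ∈ PySem.List.pyRange 0 ((PySem.Str.len re) - n + 1) 1,
          x = pvPre (PySem.Str.slice re (some i) (some (i + n)))) ∧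
       (∃ re ∈ r, ∃ i ∈ PySem.List.pyRange 0 ((PySem.Str.len re) - n + 1) 1,
          x = pvSuf (PySem.Str.slice re (some i) (some (i + n))))) := by
  simp only [optimum_alt]
  rw [pv_flatten]
  obtain ⟨h1, h2, h3, h4⟩ := pv_run
      (r.flatMap (fun re => (PySem.List.pyRange 0 ((PySem.Str.len re) - n + 1) 1).map
        (fun i => PySem.Str.slice re (some i) (some (i + n)))))
      PySem.Set.empty PySem.Dict.empty (by intro k hk; simp [PySem.Set.empty] at hk)
  have hnd := h3 (by simp)
  rw [PySem.Dict.values_eq_map_keys _ hnd (false, false), List.all_map, List.all_eq_true]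
  have hex : ∀ (p : String → Prop),
      (∃ k ∈ r.flatMap (fun re => (PySem.List.pyRange 0 ((PySem.Str.len re) - n + 1) 1).map
          (fun i => PySem.Str.slice re (some i) (some (i + n)))), p k)
        ↔ ∃ re ∈ r, ∃ i ∈ PySem.List.pyRange 0 ((PySem.Str.len re) - n + 1) 1,
            p (PySem.Str.slice re (some i) (some (i + n))) := by
    intro p
    simp only [List.mem_flatMap, List.mem_map]
    constructor
    · rintro ⟨k, ⟨re, hre, i, hi, rfl⟩, hp⟩
      exact ⟨re, hre, i, hi, hp⟩
    · rintro ⟨re, hre, i, hi, hp⟩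
      exact ⟨_, ⟨re, hre, i, hi, rfl⟩, hp⟩
  constructor
  · intro hyp x hx
    have hk : x ∈ ((r.flatMap (fun re => (PySem.List.pyRange 0 ((PySem.Str.len re) - n + 1) 1).map
        (fun i => PySem.Str.slice re (some i) (some (i + n))))).foldl pvStep
        (PySem.Set.empty, PySem.Dict.empty)).2.keys := by
      rw [h2 x]
      simp only [PySem.Dict.keys_empty, List.not_mem_nil, false_or]
      exact (hex (fun k => x = pvPre k ∨ x = pvSuf k)).mpr hx
    have h := hyp x hk
    rw [Function.comp_apply, h1 x] at h
    simp only [PySem.Dict.getD_empty, Bool.false_or, Bool.and_eq_true, decide_eq_true_eq] at h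
    exact ⟨(hex (fun k => x = pvPre k)).mp h.1, (hex (fun k => x = pvSuf k)).mp h.2⟩
  · intro hyp x hk
    rw [h2 x] at hk
    simp only [PySem.Dict.keys_empty, List.not_mem_nil, false_or] at hk
    have := hyp x ((hex (fun k => x = pvPre k ∨ x = pvSuf k)).mp hk)
    rw [Function.comp_apply, h1 x]
    simp only [PySem.Dict.getD_empty, Bool.false_or, Bool.and_eq_true, decide_eq_true_eq]
    exact ⟨(hex (fun k => x = pvPre k)).mpr this.1, (hex (fun k => x = pvSuf k)).mpr this.2⟩

-- characterisation of A's result: the prefix image and suffix image coincide as predicates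
theorem pv_A (n : Int) (r : List String) :
    optimum n r = true ↔ ∀ x : String,
      ((∃ re ∈ r, ∃ i ∈ PySem.List.pyRange 0 ((PySem.Str.len re) - n + 1) 1,
          x = pvPre (PySem.Str.slice re (some i) (some (i + n)))) ↔
       (∃ re ∈ r, ∃ i ∈ PySem.List.pyRange 0 ((PySem.Str.len re) - n + 1) 1,
          x = pvSuf (PySem.Str.slice re (some i) (some (i + n))))) := by
  simp only [optimum]
  rw [pv_split_pair, PySem.Set.equal_iff]
  constructor
  · intro hyp x
    have := hyp x
    rwa [pv_memA n r (fun k => PySem.Str.slice k none (some (-1))) x,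
         pv_memA n r (fun k => PySem.Str.slice k (some 1) none) x] at this
  · intro hyp x
    rw [pv_memA n r (fun k => PySem.Str.slice k none (some (-1))) x,
        pv_memA n r (fun k => PySem.Str.slice k (some 1) none) x]
    exact hyp x

-- ===== VERDICT (by name: the statement is the Claim_ definition above) =====
theorem optimum_spec : Claim_equal_optimum := by
  intro n r _
  unfold Spec_optimum
  rw [Bool.eq_iff_iff, pv_A, pv_altB]
  constructor
  · intro hyp x hx
    rcases hx with ⟨re, hre, i, hi, h | h⟩
    · have hp : ∃ re ∈ r, ∃ i ∈ PySem.List.pyRange 0 ((PySem.Str.len re) - n + 1) 1,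
          x = pvPre (PySem.Str.slice re (some i) (some (i + n))) := ⟨re, hre, i, hi, h⟩
      exact ⟨hp, (hyp x).mp hp⟩
    · have hs : ∃ re ∈ r, ∃ i ∈ PySem.List.pyRange 0 ((PySem.Str.len re) - n + 1) 1,
          x = pvSuf (PySem.Str.slice re (some i) (some (i + n))) := ⟨re, hre, i, hi, h⟩
      exact ⟨(hyp x).mpr hs, hs⟩
  · intro hyp x
    constructor
    · rintro ⟨re, hre, i, hi, h⟩
      exact (hyp x ⟨re, hre, i, hi, Or.inl h⟩).2
    · rintro ⟨re, hre, i, hi, h⟩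
      exact (hyp x ⟨re, hre, i, hi, Or.inr h⟩).1
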